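-- pv_equiv track=rewrite | github.com/mufeed533/66Days | algorithms_and_datastructures/exercises/replace_by_X.py | replace_by_x_1
-- ===== SOURCE A (Python) =====
-- def replace_by_x_1(string, pattern):  # straight forward solution
--     pattern_len = len(pattern)
--     i = 0
--     output_string = " "
--     while i <= len(string) - 1:
--         if string[i: i + pattern_len] == pattern:
--             if output_string[-1] != "X":
--                 output_string += "X"
--             i = i + pattern_len
--         else:
--             output_string += string[i]
--             i += 1
--     return output_string.strip()
-- ===== SOURCE B (Python) =====
-- def replace_by_x_1(string, pattern):
--     # Jump between occurrences with str.find instead of slice-comparing at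
--     # every position; collect pieces and join once.  lastX tracks whether the
--     # output currently ends with "X" (an emitted marker or a literal 'X'
--     # copied from the input), which is what decides whether a new "X" is
--     # appended.
--     m = len(pattern)
--     parts = []
--     i = 0
--     lastX = False
--     while True:
--         j = string.find(pattern, i)
--         if j == -1:
--             parts.append(string[i:])
--             break
--         parts.append(string[i:j])
--         if j > i:
--             lastX = string[j - 1] == "X"
--         if not lastX:
--             parts.append("X")
--             lastX = True
--         i = j + m
--     return "".join(parts).strip()
-- ===== Notes on version B (the rewrite author's own statement) =====
-- stated objective: faster
-- what changed: Instead of slice-comparing the pattern at every index while growing a string behind a ' ' sentinel, B jumps between occurrences with str.find in a single pass, copies the untouched segments into a parts list joined once, and tracks whether the output ends in 'X' with a boolean flag.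
-- outside the precondition, e.g. on replace_by_x_1('', ''): A returns '', B does not finish within the time limit
import Mathlib
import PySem

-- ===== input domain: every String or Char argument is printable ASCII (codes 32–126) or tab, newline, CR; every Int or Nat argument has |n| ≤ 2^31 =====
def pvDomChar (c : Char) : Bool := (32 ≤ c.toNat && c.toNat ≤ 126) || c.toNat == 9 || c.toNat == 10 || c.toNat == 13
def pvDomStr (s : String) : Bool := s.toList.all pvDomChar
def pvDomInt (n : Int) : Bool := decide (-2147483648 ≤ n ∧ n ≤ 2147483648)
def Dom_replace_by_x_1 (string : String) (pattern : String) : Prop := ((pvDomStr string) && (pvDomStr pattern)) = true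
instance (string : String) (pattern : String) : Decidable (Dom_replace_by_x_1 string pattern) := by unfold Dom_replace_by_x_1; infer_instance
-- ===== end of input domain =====

-- B replaces A's position-by-position slice comparison by a single pass that jumps
-- between occurrences with str.find, collecting the pieces and joining once (objective: faster).

-- ===== PORT A =====
-- A's while loop, transliterated; fuel makes the recursion total (the loop diverges for
-- pattern = "", which Pre_ excludes; inside Pre_ every iteration advances i by ≥ 1, so
-- fuel = len(string)+1 is never exhausted).
def replace_by_x_1_loop (s p : List Char) (fuel : Nat) (i : Nat) (out : List Char) : List Char :=
  match fuel with
  | 0 => out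
  | fuel + 1 =>
    if i < s.length then                                   -- while i <= len(string) - 1  (i ≥ 0 always)
      if PySem.List.slice s (some (i : Int)) (some ((i : Int) + (p.length : Int))) = p then
        replace_by_x_1_loop s p fuel (i + p.length)
          (if PySem.List.pyGet? out (-1) ≠ some 'X'        -- output_string[-1] != "X"  (out is never empty)
           then out ++ ['X'] else out)
      else
        replace_by_x_1_loop s p fuel (i + 1) (out ++ [PySem.List.pyGetD s (i : Int) ' '])  -- += string[i]
    else out

def replace_by_x_1 (string : String) (pattern : String) : String :=
  String.ofList (PySem.Chars.strip
    (replace_by_x_1_loop string.toList pattern.toList (string.toList.length + 1) 0 [' ']))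

-- ===== PORT B =====
-- B's outer while-True loop; parts/"".join is the ++ structure; fuel as for A
-- (the loop diverges for pattern = "", excluded by Pre_; inside Pre_ fuel = len+1 suffices).
def replace_by_x_1_alt_loop (s p : List Char) (fuel : Nat) (i : Nat) (lastX : Bool) : List Char :=
  match fuel with
  | 0 => []
  | fuel + 1 =>
    let j := PySem.Chars.findFrom s p (i : Int) none       -- j = string.find(pattern, i)
    if j = -1 then
      PySem.List.slice s (some (i : Int)) none             -- parts.append(string[i:]); break
    else
      let seg := PySem.List.slice s (some (i : Int)) (some j)   -- parts.append(string[i:j])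
      let lastX' := if (i : Int) < j then (PySem.List.pyGetD s (j - 1) ' ' == 'X') else lastX
      seg ++ (if lastX' then replace_by_x_1_alt_loop s p fuel (j.toNat + p.length) true
              else 'X' :: replace_by_x_1_alt_loop s p fuel (j.toNat + p.length) true)

def replace_by_x_1_alt (string : String) (pattern : String) : String :=
  String.ofList (PySem.Chars.strip
    (replace_by_x_1_alt_loop string.toList pattern.toList (string.toList.length + 1) 0 false))

-- ===== PRECONDITION & SPEC =====
-- Pre_ excludes the empty pattern: there A loops forever on every non-empty string (and
-- returns "" only on the degenerate input ("", "")), and B loops forever on all of them.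
def Pre_replace_by_x_1 (string : String) (pattern : String) : Prop := pattern ≠ ""
instance (string : String) (pattern : String) : Decidable (Pre_replace_by_x_1 string pattern) := by
  unfold Pre_replace_by_x_1; infer_instance

def pvWitness_replace_by_x_1 : String × String := ("ababXab hello ab", "ab")

def Spec_replace_by_x_1 (string : String) (pattern : String) (out : String) : Prop := out = replace_by_x_1_alt string pattern
instance (string : String) (pattern : String) (out : String) : Decidable (Spec_replace_by_x_1 string pattern out) := by unfold Spec_replace_by_x_1; infer_instance

-- ===== CLAIM (what is proved, stated in full; the proofs are below) =====
def Claim_equal_replace_by_x_1 : Prop := ∀ (string : String) (pattern : String), Dom_replace_by_x_1 string pattern → Pre_replace_by_x_1 string pattern → Spec_replace_by_x_1 string pattern (replace_by_x_1 string pattern)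

-- ===== LEMMAS AND PROOFS =====

-- The common specification of both loops: walk the string from position i; at a pattern
-- occurrence emit 'X' unless the previous emitted character (tracked by flag) was 'X' and
-- jump by the pattern length, otherwise copy one character.
def tailSpec (s p : List Char) (hp : p ≠ []) (i : Nat) (flag : Bool) : List Char :=
  if _h : i < s.length then
    if (s.drop i).take p.length = p then
      (if flag then [] else ['X']) ++ tailSpec s p hp (i + p.length) true
    else
      s.getD i ' ' :: tailSpec s p hp (i + 1) (s.getD i ' ' == 'X')
  else []
termination_by s.length - i
decreasing_by
  · have : 0 < p.length := List.length_pos_iff.mpr hp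
    omega
  · omega

theorem tailSpec_of_ge (s p : List Char) (hp : p ≠ []) (i : Nat) (flag : Bool)
    (h : s.length ≤ i) : tailSpec s p hp i flag = [] := by
  unfold tailSpec; simp [Nat.not_lt.mpr h]

theorem A_loop_eq (s p : List Char) (hp : p ≠ []) :
    ∀ (fuel i : Nat) (out : List Char), s.length + 1 ≤ fuel + i → out ≠ [] →
      replace_by_x_1_loop s p fuel i out = out ++ tailSpec s p hp i (out.getLast? == some 'X') := by
  intro fuel
  induction fuel with
  | zero =>
    intro i out hf ho
    rw [replace_by_x_1_loop, tailSpec_of_ge s p hp i _ (by omega)]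
    simp
  | succ f ih =>
    intro i out hf ho
    have hm1 : 0 < p.length := List.length_pos_iff.mpr hp
    rw [replace_by_x_1_loop]
    by_cases h1 : i < s.length
    · rw [if_pos h1, PySem.List.slice_natCast_add]
      conv_rhs => rw [tailSpec]
      by_cases h2 : (s.drop i).take p.length = p
      · rw [if_pos h2]
        by_cases h3 : out.getLast? = some 'X'
        · rw [if_neg (by simp [PySem.List.pyGet?_neg_one, h3])]
          rw [ih (i + p.length) out (by omega) ho]
          simp [h1, h2, h3]
        · rw [if_pos (by simp [PySem.List.pyGet?_neg_one, h3])]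
          rw [ih (i + p.length) (out ++ ['X']) (by omega) (by simp)]
          simp [h1, h2, h3]
      · rw [if_neg h2]
        rw [ih (i + 1) (out ++ [PySem.List.pyGetD s (i : Int) ' ']) (by omega) (by simp)]
        simp [h1, h2, PySem.List.pyGetD_natCast]
    · rw [if_neg h1, tailSpec_of_ge s p hp i _ (by omega)]
      simp

theorem copyAll (s p : List Char) (hp : p ≠ []) (i : Nat) (flag : Bool)
    (h : ∀ t, i ≤ t → ¬ ((s.drop t).take p.length = p)) :
    tailSpec s p hp i flag = s.drop i := by
  rw [tailSpec]
  by_cases h1 : i < s.length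
  · have hm := h i le_rfl
    simp only [h1, dif_pos, hm, if_false]
    rw [copyAll s p hp (i + 1) _ (fun t ht => h t (by omega))]
    rw [List.drop_eq_getElem_cons h1, List.getD_eq_getElem s ' ' h1]
  · simp [h1, List.drop_eq_nil_of_le (Nat.not_lt.mp h1)]
termination_by s.length - i

theorem copyTo (s p : List Char) (hp : p ≠ []) :
    ∀ (k i : Nat) (flag : Bool), (∀ t, i ≤ t → t < i + k → ¬ ((s.drop t).take p.length = p)) →
      i + k ≤ s.length →
      tailSpec s p hp i flag =
        (s.drop i).take k ++ tailSpec s p hp (i + k) (if k = 0 then flag else (s.getD (i + k - 1) ' ' == 'X')) := by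
  intro k
  induction k with
  | zero => intro i flag h hle; simp
  | succ k ih =>
    intro i flag h hle
    have h1 : i < s.length := by omega
    have hm := h i le_rfl (by omega)
    conv_lhs => rw [tailSpec]
    simp only [h1, dif_pos, hm, if_false]
    rw [ih (i + 1) _ (fun t ht1 ht2 => h t (by omega) (by omega)) (by omega)]
    rw [List.drop_eq_getElem_cons h1, List.take_succ_cons, List.getD_eq_getElem s ' ' h1]
    have e1 : i + 1 + k = i + (k + 1) := by omega
    by_cases hk : k = 0
    · subst hk
      simp [e1, List.getElem?_eq_getElem h1]
    · simp [hk, e1]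

-- a prefix of a later suffix is an infix of an earlier suffix
theorem prefix_drop_infix (s p : List Char) (i t : Nat) (hit : i ≤ t)
    (h : p <+: s.drop t) : p <:+: s.drop i := by
  obtain ⟨r, hr⟩ := h
  refine ⟨(s.drop i).take (t - i), r, ?_⟩
  have : (s.drop i).drop (t - i) = s.drop t := by
    rw [List.drop_drop]; congr 1; omega
  calc (s.drop i).take (t - i) ++ p ++ r = (s.drop i).take (t - i) ++ (p ++ r) := by simp
    _ = (s.drop i).take (t - i) ++ (s.drop i).drop (t - i) := by rw [this, hr]
    _ = s.drop i := List.take_append_drop _ _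

theorem B_loop_eq (s p : List Char) (hp : p ≠ []) :
    ∀ (fuel i : Nat) (lastX : Bool), s.length + 1 ≤ fuel + i → i ≤ s.length →
      replace_by_x_1_alt_loop s p fuel i lastX = tailSpec s p hp i lastX := by
  intro fuel
  induction fuel with
  | zero => intro i lastX hf hi; omega
  | succ f ih =>
    intro i lastX hf hi
    have hm1 : 0 < p.length := List.length_pos_iff.mpr hp
    rw [replace_by_x_1_alt_loop]
    by_cases hj : PySem.Chars.findFrom s p (i : Int) none = -1
    · rw [if_pos hj, PySem.List.slice_from s (by positivity), Int.toNat_natCast]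
      have hnone := (PySem.Chars.findFrom_natCast_eq_neg_one_iff s p i hi).mp hj
      rw [copyAll s p hp i lastX]
      intro t ht heq
      exact hnone (prefix_drop_infix s p i t ht (List.prefix_iff_eq_take.mpr heq.symm))
    · rw [if_neg hj]
      obtain ⟨hij, hpre, hmin⟩ := PySem.Chars.findFrom_natCast_spec s p i hi hj
      set jI := PySem.Chars.findFrom s p (i : Int) none with hjI
      have hj0 : 0 ≤ jI := le_trans (by positivity) hij
      have hijn : i ≤ jI.toNat := by omega
      have hjm : jI.toNat + p.length ≤ s.length := by
        have := hpre.length_le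
        simp only [List.length_drop] at this
        omega
      have hmatch : (s.drop jI.toNat).take p.length = p := (List.prefix_iff_eq_take.mp hpre).symm
      have hseg : PySem.List.slice s (some (i : Int)) (some jI) = (s.drop i).take (jI.toNat - i) := by
        rw [PySem.List.slice_toNat s (by positivity) hj0, Int.toNat_natCast]
      rw [hseg]
      rw [copyTo s p hp (jI.toNat - i) i lastX
            (fun t ht1 ht2 => fun heq =>
              hmin t ht1 (by omega) (List.prefix_iff_eq_take.mpr heq.symm))
            (by omega)]
      have e1 : i + (jI.toNat - i) = jI.toNat := by omega
      rw [e1]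
      conv_rhs => rw [tailSpec]
      rw [dif_pos (show jI.toNat < s.length by omega), if_pos hmatch]
      rw [ih (jI.toNat + p.length) true (by omega) (by omega)]
      have hflag : (if (i : Int) < jI then (PySem.List.pyGetD s (jI - 1) ' ' == 'X') else lastX)
          = (if jI.toNat - i = 0 then lastX else (s.getD (jI.toNat - 1) ' ' == 'X')) := by
        by_cases hlt : (i : Int) < jI
        · rw [if_pos hlt, if_neg (by omega)]
          have e2 : jI - 1 = ((jI.toNat - 1 : Nat) : Int) := by omega
          rw [e2, PySem.List.pyGetD_natCast]
        · rw [if_neg hlt, if_pos (by omega)]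
      rw [hflag]
      by_cases hk : jI.toNat - i = 0 <;> simp only [hk, if_true, if_false] <;>
        split_ifs <;> simp

-- ===== VERDICT (by name: the statement is the Claim_ definition above) =====
theorem replace_by_x_1_spec : Claim_equal_replace_by_x_1 := by
  intro string pattern _hd hpre
  unfold Spec_replace_by_x_1 replace_by_x_1 replace_by_x_1_alt
  have hp : pattern.toList ≠ [] := by
    intro h
    exact hpre (by rwa [← String.toList_eq_nil_iff])
  rw [A_loop_eq string.toList pattern.toList hp _ 0 [' '] (by omega) (by simp),
      B_loop_eq string.toList pattern.toList hp _ 0 false (by omega) (by omega)]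
  -- the sentinel " " only changes the initial flag (space ≠ 'X') and is removed by strip
  simp [PySem.Chars.strip, PySem.Chars.lstrip, List.getLast?,
        show PySem.Chars.isspace ' ' = true from by decide]
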